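-- pv_equiv track=rewrite | github.com/text2phenotype/biomed | biomed/tests/experiment/test_biomed_1829_sampler.py | get_n_page_segs
-- ===== SOURCE A (Python) =====
-- from typing import Dict, List, Set
--
-- def get_n_page_segs(pages: Set[int], max_splice_len):
--     out_segs = list()
--     while len(pages) > 0:
--         min_page = min(pages)
--         end = min_page + max_splice_len
--         out_segs.append((min_page, end))
--         to_remove = {pg for pg in pages if pg < end}
--         for page in to_remove:
--             pages.remove(page)
--     return out_segs
-- ===== SOURCE B (Python) =====
-- def get_n_page_segs(pages, max_splice_len):
--     out_segs = []
--     end = None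
--     for page in sorted(pages):
--         if end is None or page >= end:
--             end = page + max_splice_len
--             out_segs.append((page, end))
--     return out_segs
-- ===== Notes on version B (the rewrite author's own statement) =====
-- stated objective: faster
-- what changed: Instead of repeatedly taking min() of the remaining set and rebuilding/removing elements each round (quadratic), B sorts the pages once and does a single sweep that starts a new segment whenever a page reaches the current segment end; B also does not mutate the input set.
import Mathlib
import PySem

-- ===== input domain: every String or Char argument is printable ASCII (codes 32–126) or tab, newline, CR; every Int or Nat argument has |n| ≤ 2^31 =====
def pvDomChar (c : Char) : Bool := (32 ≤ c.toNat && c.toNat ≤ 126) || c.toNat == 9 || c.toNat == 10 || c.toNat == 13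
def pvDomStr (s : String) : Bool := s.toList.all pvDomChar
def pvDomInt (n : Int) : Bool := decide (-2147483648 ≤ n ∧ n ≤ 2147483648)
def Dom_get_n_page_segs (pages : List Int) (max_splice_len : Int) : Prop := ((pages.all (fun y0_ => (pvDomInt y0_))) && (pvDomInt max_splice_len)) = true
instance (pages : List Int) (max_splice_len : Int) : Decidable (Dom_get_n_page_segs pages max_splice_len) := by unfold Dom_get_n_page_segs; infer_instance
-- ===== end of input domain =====

-- B sorts the pages once and sweeps them in one pass instead of A's repeated min()+remove rounds
-- (objective: faster). A mutates its input set (empties it); B does not — the equivalence proved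
-- here is about the RETURN value only.

-- ===== PORT A =====
-- A's while-loop: fuel-bounded recursion (fuel = pages.length suffices whenever A terminates,
-- i.e. on Pre_; on the inputs A loops forever the fuel just runs out).
def pvAloop (k : Int) : Nat → List Int → List (Int × Int)
  | 0, _ => []
  | fuel+1, pages =>
    match PySem.List.min? pages (fun x => x) with
    | none => []  -- len(pages) == 0: loop exits
    | some m =>
      -- end = min_page + max_splice_len; append; remove every pg < end
      (m, m + k) :: pvAloop k fuel (pages.filter (fun pg => !decide (pg < m + k)))

def get_n_page_segs (pages : List Int) (max_splice_len : Int) : List (Int × Int) :=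
  pvAloop max_splice_len pages.length pages

-- ===== PORT B =====
def get_n_page_segs_alt (pages : List Int) (max_splice_len : Int) : List (Int × Int) :=
  ((PySem.List.sorted pages (fun x => x) false).foldl
    (fun st page =>
      match st with
      | (none, out) => (some (page + max_splice_len), out ++ [(page, page + max_splice_len)])
      | (some e, out) =>
        if page < e then (some e, out)
        else (some (page + max_splice_len), out ++ [(page, page + max_splice_len)]))
    ((none : Option Int), ([] : List (Int × Int)))).2

-- ===== PRECONDITION & SPEC =====
-- Pre_ excludes max_splice_len ≤ 0 with nonempty pages: there A's loop removes nothing and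
-- never terminates (infinite loop), so A returns no value.
def Pre_get_n_page_segs (pages : List Int) (max_splice_len : Int) : Prop :=
  pages = [] ∨ 0 < max_splice_len
instance (pages : List Int) (max_splice_len : Int) : Decidable (Pre_get_n_page_segs pages max_splice_len) := by unfold Pre_get_n_page_segs; infer_instance

def pvWitness_get_n_page_segs : List Int × Int := ([1, 2, 5, 9], 3)

def Spec_get_n_page_segs (pages : List Int) (max_splice_len : Int) (out : List (Int × Int)) : Prop := out = get_n_page_segs_alt pages max_splice_len
instance (pages : List Int) (max_splice_len : Int) (out : List (Int × Int)) : Decidable (Spec_get_n_page_segs pages max_splice_len out) := by unfold Spec_get_n_page_segs; infer_instance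

-- ===== CLAIM (what is proved, stated in full; the proofs are below) =====
def Claim_equal_get_n_page_segs : Prop := ∀ (pages : List Int) (max_splice_len : Int), Dom_get_n_page_segs pages max_splice_len → Pre_get_n_page_segs pages max_splice_len → Spec_get_n_page_segs pages max_splice_len (get_n_page_segs pages max_splice_len)

-- ===== LEMMAS AND PROOFS =====

-- Proof-side recursive description of B's sweep: current segment end e, skip pages below it.
def pvSweep (k : Int) (e : Int) : List Int → List (Int × Int)
  | [] => []
  | p :: t => if p < e then pvSweep k e t else (p, p + k) :: pvSweep k (p + k) t

-- B's sweep on a whole (sorted) list: the first element always opens a segment.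
def pvBTop (k : Int) : List Int → List (Int × Int)
  | [] => []
  | p :: t => (p, p + k) :: pvSweep k (p + k) t

-- unrolling B's foldl once the first segment is open
theorem pvFoldlSome (k : Int) (s : List Int) : ∀ (e : Int) (out : List (Int × Int)),
    (s.foldl
      (fun st page =>
        match st with
        | (none, out) => (some (page + k), out ++ [(page, page + k)])
        | (some e, out) =>
          if page < e then (some e, out)
          else (some (page + k), out ++ [(page, page + k)]))
      ((some e : Option Int), out)).2 = out ++ pvSweep k e s := by
  induction s with
  | nil => intro e out; simp [pvSweep]
  | cons p t ih =>
    intro e out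
    simp only [List.foldl_cons, pvSweep]
    by_cases h : p < e
    · simp [h, ih]
    · simp [h, ih]

theorem pvAltEq (pages : List Int) (k : Int) :
    get_n_page_segs_alt pages k = pvBTop k (PySem.List.sorted pages (fun x => x) false) := by
  unfold get_n_page_segs_alt
  cases hs : PySem.List.sorted pages (fun x => x) false with
  | nil => rfl
  | cons p t => simp [pvBTop, pvFoldlSome]

-- elements below e, filtered away, would have been skipped by any sweep with threshold ≥ e
theorem pvSweepFilter (k e : Int) (hk : 0 < k) (t : List Int) : ∀ e', e ≤ e' →
    pvSweep k e' (t.filter (fun pg => !decide (pg < e))) = pvSweep k e' t := by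
  induction t with
  | nil => intro e' _; rfl
  | cons p t ih =>
    intro e' he
    by_cases h : p < e
    · have h2 : p < e' := lt_of_lt_of_le h he
      simp [h, pvSweep, h2, ih e' he]
    · simp only [List.filter_cons, h, decide_false, Bool.not_false, if_true, pvSweep]
      by_cases h2 : p < e'
      · simp [h2, ih e' he]
      · have hpe : e ≤ p + k := by omega
        simp [h2, ih (p + k) hpe]

theorem pvBTopFilter (k e : Int) (hk : 0 < k) (t : List Int) :
    pvBTop k (t.filter (fun pg => !decide (pg < e))) = pvSweep k e t := by
  induction t with
  | nil => rfl
  | cons p t ih =>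
    by_cases h : p < e
    · simp only [List.filter_cons, h, decide_true, Bool.not_true, pvSweep]
      simp [ih]
    · have hpe : e ≤ p + k := by omega
      simp only [List.filter_cons, h, decide_false, Bool.not_false, if_true, pvBTop, pvSweep]
      simp [pvSweepFilter k e hk t (p + k) hpe]

-- the head of sorted(l) is min(l)
theorem pvSortedHeadMin (l : List Int) (m : Int) (h : PySem.List.min? l (fun x => x) = some m) :
    ∃ t, PySem.List.sorted l (fun x => x) false = m :: t := by
  have hml := PySem.List.min?_mem h
  have hmin := PySem.List.min?_isMin h
  cases hs : PySem.List.sorted l (fun x => x) false with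
  | nil =>
    exact absurd ((PySem.List.sorted_eq_nil_iff ..).mp hs ▸ hml) (List.not_mem_nil)
  | cons hd t =>
    have hhd : ∀ y ∈ l, hd ≤ y := PySem.List.key_head_sorted_le l (fun x => x) hs
    have hhl : hd ∈ l :=
      (PySem.List.mem_sorted (x := hd) (xs := l) (key := fun x => x) (rev := false)).mp
        (hs ▸ List.mem_cons_self)
    exact ⟨t, by rw [le_antisymm (hhd m hml) (hmin hd hhl)]⟩

-- sorting commutes with filtering
theorem pvSortedFilter (l : List Int) (p : Int → Bool) :
    PySem.List.sorted (l.filter p) (fun x => x) false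
      = (PySem.List.sorted l (fun x => x) false).filter p :=
  PySem.List.sorted_id_eq_of_perm_of_pairwise _ _
    (((PySem.List.sorted_perm l (fun x => x) false).filter p))
    (List.Pairwise.filter p (PySem.List.sorted_pairwise l (fun x => x)))

theorem pvMain (k : Int) (hk : 0 < k) : ∀ (fuel : Nat) (l : List Int), l.length ≤ fuel →
    pvAloop k fuel l = pvBTop k (PySem.List.sorted l (fun x => x) false) := by
  intro fuel
  induction fuel with
  | zero =>
    intro l hl
    have : l = [] := List.eq_nil_of_length_eq_zero (Nat.le_zero.mp hl)
    subst this; rfl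
  | succ fuel ih =>
    intro l hl
    cases hm : PySem.List.min? l (fun x => x) with
    | none =>
      have : l = [] := (PySem.List.min?_eq_none_iff ..).mp hm
      subst this; rfl
    | some m =>
      obtain ⟨t, hs⟩ := pvSortedHeadMin l m hm
      have hml := PySem.List.min?_mem hm
      have hlen : (l.filter (fun pg => !decide (pg < m + k))).length ≤ fuel := by
        have : (l.filter (fun pg => !decide (pg < m + k))).length < l.length := by
          apply (List.length_filter_lt_length_iff_exists ..).mpr
          exact ⟨m, hml, by simp; omega⟩
        omega
      rw [pvAloop, hm]
      show (m, m + k) :: pvAloop k fuel (l.filter (fun pg => !decide (pg < m + k)))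
        = pvBTop k (PySem.List.sorted l (fun x => x) false)
      rw [ih _ hlen, pvSortedFilter, hs]
      have hPm : (!decide (m < m + k)) = false := by simp; omega
      rw [List.filter_cons]
      simp only [hPm, Bool.false_eq_true, if_false]
      rw [pvBTopFilter k (m + k) hk t]
      rfl

-- ===== VERDICT (by name: the statement is the Claim_ definition above) =====
theorem get_n_page_segs_spec : Claim_equal_get_n_page_segs := by
  intro pages k _ hpre
  unfold Spec_get_n_page_segs get_n_page_segs
  rcases hpre with h | hk
  · subst h; rfl
  · rw [pvMain k hk pages.length pages le_rfl, pvAltEq]
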